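-- pv_equiv track=rewrite | github.com/rajkhatri398/AI_DDR | pipeline.py | _build_image_index
-- ===== SOURCE A (Python) =====
-- def _build_image_index(images):
--     index = {}
--     for img in images:
--         if isinstance(img, dict):
--             key_source = str(img.get("source", "")).strip().lower()
--             entry = str(img.get("path", "Not Available") or "Not Available")
--         else:
--             key_source = ""
--             entry = str(img or "Not Available")
--
--         if key_source not in index:
--             index[key_source] = []
--         if entry not in index[key_source]:
--             index[key_source].append(entry)
--     return index
-- ===== SOURCE B (Python) =====
-- def _build_image_index(images):
--     # Stage 1: normalise every image to a (source_key, entry) pair, no grouping yet.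
--     pairs = []
--     for img in images:
--         if isinstance(img, dict):
--             key_source = str(img.get("source", "")).strip().lower()
--             entry = str(img.get("path", "Not Available") or "Not Available")
--         else:
--             key_source = ""
--             entry = str(img or "Not Available")
--         pairs.append((key_source, entry))
--     # Stage 2: distinct keys in first-appearance order, then gather each key's
--     # entries from the pair list and dedup them preserving first occurrences.
--     keys = list(dict.fromkeys(k for k, _ in pairs))
--     return {k: list(dict.fromkeys(e for kk, e in pairs if kk == k)) for k in keys}
-- ===== Notes on version B (the rewrite author's own statement) =====
-- stated objective: alternative
-- what changed: B never builds the index while scanning: it first flattens every image into a (key, entry) pair list, then computes the distinct keys in first-appearance order and, for each key, gathers and order-dedups that key's entries from the pair list -- a staged map/gather instead of A's incremental dict with a per-append membership test.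
import Mathlib
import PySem

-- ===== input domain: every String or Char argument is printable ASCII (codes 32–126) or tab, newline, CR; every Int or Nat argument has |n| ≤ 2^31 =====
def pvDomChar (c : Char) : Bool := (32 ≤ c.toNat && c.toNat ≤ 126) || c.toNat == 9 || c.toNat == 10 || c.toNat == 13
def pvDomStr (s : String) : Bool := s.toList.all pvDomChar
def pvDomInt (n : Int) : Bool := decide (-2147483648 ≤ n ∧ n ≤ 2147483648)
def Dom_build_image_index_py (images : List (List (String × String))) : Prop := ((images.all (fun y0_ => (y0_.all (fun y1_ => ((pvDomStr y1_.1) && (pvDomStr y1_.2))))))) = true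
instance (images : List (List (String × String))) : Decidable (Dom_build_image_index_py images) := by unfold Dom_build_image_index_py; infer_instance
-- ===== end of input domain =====

-- B is a staged map/gather: it flattens the images to a (key, entry) pair list, then builds
-- each group by a per-key scan of that list with a final order-preserving dedup, instead of
-- A's incremental dict with a per-append membership test; objective: alternative (same cost class).
-- Under the type convention every img is a dict, so A's isinstance(img, dict) branch is always taken; the else branch is dead code and not ported.

-- the key / entry both Pythons compute for one image (shared helper)
def pvKey (img : List (String × String)) : String :=
  PySem.Str.lower (PySem.Str.strip ((PySem.Dict.mk img).getD "source" ""))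
def pvEntry (img : List (String × String)) : String :=
  let p := (PySem.Dict.mk img).getD "path" "Not Available"
  if p = "" then "Not Available" else p    -- str(... or "Not Available"): "" is falsy

-- ===== PORT A =====
-- A's loop body: group into a dict in place, with a membership check before each append
def pvAStep (index : PySem.Dict String (List String)) (img : List (String × String)) :
    PySem.Dict String (List String) :=
  let key_source := pvKey img
  let entry := pvEntry img
  let index := if index.contains key_source then index else index.insert key_source []
  if entry ∈ index.getD key_source [] then index
  else index.modify key_source [] (fun l => l ++ [entry])

def build_image_index_py (images : List (List (String × String))) : List (String × List String) :=
  (images.foldl pvAStep PySem.Dict.empty).items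

-- ===== PORT B =====
def build_image_index_py_alt (images : List (List (String × String))) : List (String × List String) :=
  let pairs := images.map (fun img => (pvKey img, pvEntry img))            -- stage 1
  let keys := PySem.List.dedup (pairs.map Prod.fst)                        -- list(dict.fromkeys(...))
  keys.map (fun k =>                                                       -- stage 2: per-key gather
    (k, PySem.List.dedup ((pairs.filter (fun p => p.1 == k)).map Prod.snd)))

-- ===== PRECONDITION & SPEC =====
def Spec_build_image_index_py (images : List (List (String × String))) (out : List (String × List String)) : Prop := out = build_image_index_py_alt images
instance (images : List (List (String × String))) (out : List (String × List String)) : Decidable (Spec_build_image_index_py images out) := by unfold Spec_build_image_index_py; infer_instance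

-- ===== CLAIM (what is proved, stated in full; the proofs are below) =====
def Claim_equal_build_image_index_py : Prop := ∀ (images : List (List (String × String))), Dom_build_image_index_py images → Spec_build_image_index_py images (build_image_index_py images)

-- ===== LEMMAS AND PROOFS =====

theorem pvAStep_eq (a : PySem.Dict String (List String)) (img : List (String × String)) :
    pvAStep a img =
      (let a1 := if a.contains (pvKey img) then a else a.insert (pvKey img) [];
       if pvEntry img ∈ a1.getD (pvKey img) [] then a1
       else a1.modify (pvKey img) [] (fun l => l ++ [pvEntry img])) := rfl

-- keys of one A step
theorem pv_keys_aStep (a : PySem.Dict String (List String)) (img : List (String × String)) :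
    (pvAStep a img).keys = if a.contains (pvKey img) then a.keys else a.keys ++ [pvKey img] := by
  rw [pvAStep_eq]
  by_cases hc : a.contains (pvKey img) = true
  · simp only [hc, if_true]
    split
    · rfl
    · rw [PySem.Dict.keys_modify, PySem.Dict.keys_insert_of_contains _ _ hc]
  · simp only [Bool.not_eq_true] at hc
    simp only [hc, Bool.false_eq_true, if_false]
    split
    · rw [PySem.Dict.keys_insert_of_not_contains _ _ hc]
    · rw [PySem.Dict.keys_modify,
          PySem.Dict.keys_insert_of_contains _ _ (PySem.Dict.contains_insert_self a _ _),
          PySem.Dict.keys_insert_of_not_contains _ _ hc]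

-- value at k of one A step
theorem pv_getD_aStep (a : PySem.Dict String (List String)) (img : List (String × String)) (k : String) :
    (pvAStep a img).getD k [] =
      if k = pvKey img then
        (if pvEntry img ∈ a.getD (pvKey img) [] then a.getD (pvKey img) []
         else a.getD (pvKey img) [] ++ [pvEntry img])
      else a.getD k [] := by
  by_cases hc : a.contains (pvKey img) = true
  · rw [pvAStep_eq]
    simp only [hc, if_true]
    by_cases hmem : pvEntry img ∈ a.getD (pvKey img) []
    · simp only [hmem, if_true]
      by_cases h : k = pvKey img <;> simp [h]
    · simp [hmem, PySem.Dict.getD_modify]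
  · simp only [Bool.not_eq_true] at hc
    have hget : a.getD (pvKey img) [] = [] := PySem.Dict.getD_of_not_contains _ _ hc
    rw [pvAStep_eq]
    simp only [hc, Bool.false_eq_true, if_false]
    have hins : ∀ k', (a.insert (pvKey img) ([] : List String)).getD k' [] =
        if k' = pvKey img then [] else a.getD k' [] := by
      intro k'; rw [PySem.Dict.getD_insert]
    by_cases h : k = pvKey img
    · simp [hins, h, hget]
    · simp [hins, PySem.Dict.getD_modify, h]

-- loop invariant: A's accumulator is exactly B's staged description of the processed pairs
theorem pv_main (rest : List (List (String × String)))
    (a : PySem.Dict String (List String)) (ps : List (String × String))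
    (hk : a.keys = PySem.Set.ofList (ps.map Prod.fst))
    (hv : ∀ k, a.getD k [] = PySem.Set.ofList ((ps.filter (fun p => p.1 == k)).map Prod.snd)) :
    (rest.foldl pvAStep a).items =
      (PySem.Set.ofList ((ps ++ rest.map (fun i => (pvKey i, pvEntry i))).map Prod.fst)).map
        (fun k => (k, PySem.Set.ofList
          (((ps ++ rest.map (fun i => (pvKey i, pvEntry i))).filter (fun p => p.1 == k)).map Prod.snd))) := by
  induction rest generalizing a ps with
  | nil =>
      simp only [List.map_nil, List.append_nil, List.foldl_nil]
      rw [PySem.Dict.items_eq_map_keys a (hk ▸ PySem.Set.nodup_ofList _) [], hk]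
      exact List.map_congr_left (fun k _ => by rw [hv k])
  | cons img rest ih =>
      simp only [List.foldl_cons, List.map_cons]
      have hre : ∀ (l : List (String × String)),
          ps ++ (pvKey img, pvEntry img) :: l = (ps ++ [(pvKey img, pvEntry img)]) ++ l := by
        intro l; simp
      rw [hre]
      refine ih _ _ ?_ ?_
      · rw [pv_keys_aStep, hk, List.map_append, List.map_cons, List.map_nil,
            PySem.Set.ofList_append_singleton]
        have hc : a.contains (pvKey img) = decide (pvKey img ∈ a.keys) :=
          PySem.Dict.contains_eq_decide_mem_keys a _
        by_cases hm : pvKey img ∈ ps.map Prod.fst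
        · rw [PySem.Set.add_of_mem ((PySem.Set.mem_ofList _ _).mpr hm)]
          simp [hc, hk, hm]
        · rw [PySem.Set.add_of_not_mem (fun hx => hm ((PySem.Set.mem_ofList _ _).mp hx))]
          simp [hc, hk, hm]
      · intro k
        rw [pv_getD_aStep, List.filter_append, List.map_append]
        by_cases h : k = pvKey img
        · simp only [h, if_true]
          have hfe : ([(pvKey img, pvEntry img)].filter (fun p => p.1 == pvKey img)).map Prod.snd
              = [pvEntry img] := by simp
          rw [hfe, PySem.Set.ofList_append_singleton, ← hv (pvKey img)]
          by_cases hmem : pvEntry img ∈ a.getD (pvKey img) []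
          · rw [if_pos hmem, PySem.Set.add_of_mem hmem]
          · rw [if_neg hmem, PySem.Set.add_of_not_mem hmem]
        · simp only [h, if_false]
          have hfe : ([(pvKey img, pvEntry img)].filter (fun p => p.1 == k)).map Prod.snd
              = ([] : List String) := by simp; exact fun hx => h hx.symm
          rw [hfe, List.append_nil]
          exact hv k

-- ===== VERDICT (by name: the statement is the Claim_ definition above) =====
theorem build_image_index_py_spec : Claim_equal_build_image_index_py := by
  intro images _
  unfold Spec_build_image_index_py build_image_index_py build_image_index_py_alt
  simp only [PySem.List.dedup_eq_ofList]
  have := pv_main images PySem.Dict.empty []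
    (by simp [PySem.Dict.empty, PySem.Set.ofList_nil])
    (fun k => by simp [PySem.Dict.getD_empty, PySem.Set.ofList_nil])
  simpa using this
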